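-- pv_equiv track=rewrite | github.com/Shivkisku/Python_adv | building_view_count.py | count_buildings_with_view
-- ===== SOURCE A (Python) =====
-- def count_buildings_with_view(heights):
--     count = 0
--     max_height = 0
--
--     for height in heights:
--         if height > max_height:
--             count += 1
--             max_height = height
--
--     return count
-- ===== SOURCE B (Python) =====
-- def count_buildings_with_view(heights):
--     hs = list(heights)
--     # phase 1: prefix maxima (seeded with 0): prefix[i] = max of 0 and all heights before i
--     prefix = [0]
--     for h in hs:
--         prefix.append(max(prefix[-1], h))
--     # phase 2: count positions where the height strictly exceeds its prefix maximum
--     return sum(1 for h, m in zip(hs, prefix) if h > m)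
-- ===== Notes on version B (the rewrite author's own statement) =====
-- stated objective: alternative
-- what changed: Replaces the single interleaved loop (running max + counter in one state) by a two-phase decomposition: first build the 0-seeded prefix-maxima table, then count positions where the height strictly exceeds its prefix maximum.
import Mathlib
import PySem

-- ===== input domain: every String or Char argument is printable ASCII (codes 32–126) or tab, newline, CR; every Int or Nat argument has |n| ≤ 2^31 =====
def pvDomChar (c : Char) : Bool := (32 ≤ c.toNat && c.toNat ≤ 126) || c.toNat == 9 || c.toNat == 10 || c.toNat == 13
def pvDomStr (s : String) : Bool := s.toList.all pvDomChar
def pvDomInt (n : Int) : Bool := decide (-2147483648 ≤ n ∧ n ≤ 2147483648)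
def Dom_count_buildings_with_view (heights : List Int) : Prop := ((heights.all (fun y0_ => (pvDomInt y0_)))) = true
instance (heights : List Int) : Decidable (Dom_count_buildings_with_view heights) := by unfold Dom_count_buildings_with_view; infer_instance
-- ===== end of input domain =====

-- B replaces A's single interleaved loop by a two-phase decomposition (prefix-maxima table, then count); same cost, alternative structure.


-- ===== PORT A =====
-- A's loop: state (count, max_height), branch in source order
def cbwvLoopA : List Int → Int → Int → Int
  | [], count, _max_height => count
  | h :: t, count, max_height =>
      if h > max_height then cbwvLoopA t (count + 1) h
      else cbwvLoopA t count max_height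

def count_buildings_with_view (heights : List Int) : Int :=
  cbwvLoopA heights 0 0

-- ===== PORT B =====
-- phase 1 of Source B: prefix[i] = max of seed and all heights before position i (list has length n+1)
def cbwvPrefix : Int → List Int → List Int
  | m, [] => [m]
  | m, h :: t => m :: cbwvPrefix (max m h) t

def count_buildings_with_view_alt (heights : List Int) : Int :=
  -- phase 2 of Source B: zip heights with the table (zip drops the extra last entry) and count h > m
  ((heights.zip (cbwvPrefix 0 heights)).filter (fun p => p.1 > p.2)).length

-- ===== PRECONDITION & SPEC =====
def Spec_count_buildings_with_view (heights : List Int) (out : Int) : Prop := out = count_buildings_with_view_alt heights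
instance (heights : List Int) (out : Int) : Decidable (Spec_count_buildings_with_view heights out) := by unfold Spec_count_buildings_with_view; infer_instance

-- ===== CLAIM (what is proved, stated in full; the proofs are below) =====
def Claim_equal_count_buildings_with_view : Prop := ∀ (heights : List Int), Dom_count_buildings_with_view heights → Spec_count_buildings_with_view heights (count_buildings_with_view heights)

-- ===== LEMMAS AND PROOFS =====
theorem cbwvLoopA_eq_count (hs : List Int) : ∀ (c m : Int),
    cbwvLoopA hs c m = c + ((hs.zip (cbwvPrefix m hs)).filter (fun p => p.1 > p.2)).length := by
  induction hs with
  | nil => intro c m; simp [cbwvLoopA, cbwvPrefix]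
  | cons h t ih =>
      intro c m
      simp only [cbwvLoopA, cbwvPrefix, List.zip_cons_cons, List.filter_cons]
      by_cases hgt : h > m
      · have hmax : max m h = h := by omega
        simp [hgt, hmax, ih]
        omega
      · have hmax : max m h = m := by omega
        simp [hgt, hmax, ih]

-- ===== VERDICT (by name: the statement is the Claim_ definition above) =====
theorem count_buildings_with_view_spec : Claim_equal_count_buildings_with_view := by
  intro heights _
  show _ = _
  simp [count_buildings_with_view, count_buildings_with_view_alt, cbwvLoopA_eq_count]
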